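-- pv_equiv track=rewrite | github.com/vitorcezli/geneticProgramming | simulation.py | number_same_individuals
-- ===== SOURCE A (Python) =====
-- def number_same_individuals(population):
-- 	"Returns the number of same individuals"
-- 	# variables that will be used to count
-- 	individuals = [str(individual[0]) for individual in population]
-- 	dictIndividual = {}
-- 	same = 0
--
-- 	# puts each time the individual appears on the dictionary
-- 	for individual in individuals:
-- 		if individual in dictIndividual:
-- 			dictIndividual[individual] += 1
-- 		else:
-- 			dictIndividual[individual] = 1
--
-- 	# gets the number of repeated individuals
-- 	for individual, count in dictIndividual.items():
-- 		if count > 1: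
-- 			same += count
-- 	return same
-- ===== SOURCE B (Python) =====
-- def number_same_individuals(population):
-- 	"Returns the number of same individuals"
-- 	# sort the keys, then scan consecutive runs of equal keys
-- 	keys = sorted(str(individual[0]) for individual in population)
-- 	total = 0
-- 	run = 0
-- 	prev = None
-- 	for k in keys:
-- 		if k == prev:
-- 			run += 1
-- 		else:
-- 			if run > 1:
-- 				total += run
-- 			run = 1
-- 			prev = k
-- 	if run > 1:
-- 		total += run
-- 	return total
-- ===== Notes on version B (the rewrite author's own statement) =====
-- stated objective: alternative
-- what changed: Replaces the dictionary counting pass plus an items() pass with sorting the keys and a single scan over consecutive runs of equal keys, summing the lengths of runs longer than 1.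
-- outside the precondition, e.g. on number_same_individuals([[]]): A raises IndexError, B raises IndexError
import Mathlib
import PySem

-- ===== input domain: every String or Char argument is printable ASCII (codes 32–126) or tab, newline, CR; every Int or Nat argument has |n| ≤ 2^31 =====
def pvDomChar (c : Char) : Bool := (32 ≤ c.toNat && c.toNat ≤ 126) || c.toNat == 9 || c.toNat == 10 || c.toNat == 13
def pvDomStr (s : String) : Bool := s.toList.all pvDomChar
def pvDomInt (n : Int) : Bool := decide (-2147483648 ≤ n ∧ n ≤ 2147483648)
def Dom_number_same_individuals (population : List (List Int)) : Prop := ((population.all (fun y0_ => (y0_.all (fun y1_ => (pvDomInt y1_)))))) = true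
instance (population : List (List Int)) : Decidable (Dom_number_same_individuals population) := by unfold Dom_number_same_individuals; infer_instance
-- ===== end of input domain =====

-- B sorts the keys and sums consecutive runs of equal keys longer than 1 instead of A's dictionary counting; return-value equivalence on populations whose rows are nonempty.


-- ===== PORT A =====
-- str(individual[0]); rows are nonempty under Pre_, there pyGetD = the element (0 is never reached)
def number_same_individuals (population : List (List Int)) : Int :=
  let individuals := population.map (fun individual => PySem.Int.toStr (PySem.List.pyGetD individual 0 0))
  let dictIndividual := individuals.foldl (fun d individual =>
      if d.contains individual then d.insert individual (d.getD individual 0 + 1)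
      else d.insert individual 1) (PySem.Dict.empty : PySem.Dict String Int)
  dictIndividual.items.foldl (fun same p => if p.2 > 1 then same + p.2 else same) (0 : Int)

-- ===== PORT B =====
-- the scan loop of Source B: state (total, run, prev), flushed once more after the loop
def nsiScan : List String → Int → Int → Option String → Int
  | [], total, run, _ => if run > 1 then total + run else total
  | k :: rest, total, run, prev =>
      if some k = prev then nsiScan rest total (run + 1) prev
      else nsiScan rest (if run > 1 then total + run else total) 1 (some k)

def number_same_individuals_alt (population : List (List Int)) : Int :=
  let keys := PySem.List.sorted (population.map (fun individual => PySem.Int.toStr (PySem.List.pyGetD individual 0 0))) (fun x => x) false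
  nsiScan keys 0 0 none

-- ===== PRECONDITION & SPEC =====
-- Pre_ excludes populations containing an empty row, on which Python's individual[0] raises IndexError (in A and in B alike)
def Pre_number_same_individuals (population : List (List Int)) : Prop :=
  ∀ row ∈ population, row ≠ []
instance (population : List (List Int)) : Decidable (Pre_number_same_individuals population) := by unfold Pre_number_same_individuals; infer_instance

def pvWitness_number_same_individuals : List (List Int) := [[1], [2], [1], [3, 7]]

def Spec_number_same_individuals (population : List (List Int)) (out : Int) : Prop := out = number_same_individuals_alt population
instance (population : List (List Int)) (out : Int) : Decidable (Spec_number_same_individuals population out) := by unfold Spec_number_same_individuals; infer_instance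

-- ===== CLAIM (what is proved, stated in full; the proofs are below) =====
def Claim_equal_number_same_individuals : Prop := ∀ (population : List (List Int)), Dom_number_same_individuals population → Pre_number_same_individuals population → Spec_number_same_individuals population (number_same_individuals population)

-- ===== LEMMAS AND PROOFS =====

-- the common value: over the distinct keys of l, sum the multiplicities that exceed 1
def nsiSum (l : List String) : Int :=
  ((PySem.Set.ofList l).map (fun k => if 1 < l.count k then (l.count k : Int) else 0)).sum

-- A-side: the conditional-insert counting loop is Counter(l)
theorem nsi_fold_eq_counter (l : List String) :
    l.foldl (fun d individual =>
      if d.contains individual then d.insert individual (d.getD individual 0 + 1)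
      else d.insert individual 1) (PySem.Dict.empty : PySem.Dict String Int)
    = PySem.Dict.counter l := by
  rw [← PySem.Dict.foldl_insert_getD_add_one_eq_counter]
  congr 1
  funext d x
  by_cases h : d.contains x
  · simp [h]
  · simp only [Bool.not_eq_true] at h
    simp [h, PySem.Dict.getD_of_not_contains d 0 h]

theorem nsi_foldl_if (l : List (String × Int)) (a : Int) :
    l.foldl (fun same p => if p.2 > 1 then same + p.2 else same) a
    = a + (l.map (fun p => if p.2 > 1 then p.2 else 0)).sum := by
  induction l generalizing a with
  | nil => simp
  | cons p t ih => simp only [List.foldl_cons, List.map_cons, List.sum_cons, ih]; split_ifs <;> ring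

theorem nsi_A_eq (population : List (List Int)) :
    number_same_individuals population
    = nsiSum (population.map (fun individual => PySem.Int.toStr (PySem.List.pyGetD individual 0 0))) := by
  unfold number_same_individuals nsiSum
  simp only []
  rw [nsi_fold_eq_counter, nsi_foldl_if, PySem.Dict.items_counter, List.map_map]
  simp only [zero_add]
  refine congrArg List.sum (List.map_congr_left ?_)
  intro k _
  simp only [Function.comp_apply]
  by_cases h : 1 < List.count k (population.map (fun individual => PySem.Int.toStr (PySem.List.pyGetD individual 0 0)))
  · rw [if_pos (by exact_mod_cast h), if_pos h]
  · rw [if_neg (by exact_mod_cast h), if_neg h]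

-- B-side auxiliary facts ---------------------------------------------------

theorem nsiScan_replicate (m : Nat) (rest : List String) (t run : Int) (k : String) :
    nsiScan (List.replicate m k ++ rest) t run (some k) = nsiScan rest t (run + m) (some k) := by
  induction m generalizing run with
  | zero => simp
  | succ n ih =>
    rw [List.replicate_succ, List.cons_append]
    show nsiScan _ t run (some k) = _
    rw [show nsiScan (k :: (List.replicate n k ++ rest)) t run (some k)
        = nsiScan (List.replicate n k ++ rest) t (run + 1) (some k) by simp [nsiScan]]
    rw [ih]
    congr 1
    push_cast
    ring

-- in a sorted list, the head's duplicates form a prefix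
theorem nsi_sorted_split (rest : List String) (k : String)
    (h : (k :: rest).Pairwise (· ≤ ·)) :
    ∃ m rest', rest = List.replicate m k ++ rest' ∧ k ∉ rest' ∧ rest'.Pairwise (· ≤ ·) := by
  induction rest with
  | nil => exact ⟨0, [], by simp, by simp, by simp⟩
  | cons a r ih =>
    rcases List.pairwise_cons.mp h with ⟨hk, hp⟩
    by_cases hak : a = k
    · subst hak
      have h' : (a :: r).Pairwise (· ≤ ·) := hp
      obtain ⟨m, rest', h1, h2, h3⟩ := ih (List.pairwise_cons.mpr ⟨fun y hy => (List.pairwise_cons.mp hp).1 y hy, (List.pairwise_cons.mp hp).2⟩)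
      exact ⟨m + 1, rest', by simp [List.replicate_succ, h1], h2, h3⟩
    · refine ⟨0, a :: r, by simp, ?_, hp⟩
      intro hmem
      rcases hmem with _ | ⟨_, hr⟩
      · exact hak rfl
      · have h1 : k ≤ a := hk a (by simp)
        have h2 : a ≤ k := (List.pairwise_cons.mp hp).1 k hr
        exact hak (le_antisymm h2 h1)

theorem nsi_ofList_prefix (m : Nat) (k : String) (rest' : List String) (hk : k ∉ rest') :
    PySem.Set.ofList (k :: (List.replicate m k ++ rest')) = k :: PySem.Set.ofList rest' := by
  have hrep : PySem.Set.ofList (k :: List.replicate m k) = [k] := by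
    induction m with
    | zero => rfl
    | succ n ih =>
      rw [show k :: List.replicate (n+1) k = (k :: List.replicate n k) ++ [k] by simp [List.replicate_succ']]
      rw [PySem.Set.ofList_append_singleton, ih, PySem.Set.add_of_mem (by simp)]
  rw [show k :: (List.replicate m k ++ rest') = (k :: List.replicate m k) ++ rest' by simp]
  rw [PySem.Set.ofList_append, hrep, PySem.Set.update_eq_append_filter]
  have : ∀ y ∈ PySem.Set.ofList rest', (!PySem.Set.contains [k] y) = true := by
    intro y hy
    have hyk : y ≠ k := fun h => hk (h ▸ ((PySem.Set.mem_ofList _ _).mp hy))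
    simp [PySem.Set.contains, hyk]
  rw [List.filter_eq_self.mpr this]
  rfl

theorem nsi_sum_split (m : Nat) (k : String) (rest' : List String) (hk : k ∉ rest') :
    nsiSum (k :: (List.replicate m k ++ rest'))
    = (if (1 : Int) + m > 1 then (1 : Int) + m else 0) + nsiSum rest' := by
  unfold nsiSum
  rw [nsi_ofList_prefix m k rest' hk, List.map_cons, List.sum_cons]
  have hck : (k :: (List.replicate m k ++ rest')).count k = 1 + m := by
    simp [List.count_append, List.count_eq_zero.mpr hk]
    omega
  have htail : (PySem.Set.ofList rest').map
        (fun x => if 1 < (k :: (List.replicate m k ++ rest')).count x then ((k :: (List.replicate m k ++ rest')).count x : Int) else 0)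
      = (PySem.Set.ofList rest').map (fun x => if 1 < rest'.count x then (rest'.count x : Int) else 0) := by
    apply List.map_congr_left
    intro x hx
    have hxk : x ≠ k := fun h => hk (h ▸ ((PySem.Set.mem_ofList _ _).mp hx))
    have : (k :: (List.replicate m k ++ rest')).count x = rest'.count x := by
      simp [List.count_append, List.count_replicate, Ne.symm hxk]
    rw [this]
  rw [htail, hck]
  congr 1
  by_cases hm : 1 < 1 + m
  · have h1 : (1 : Int) + m > 1 := by omega
    simp [hm, h1]
  · have h1 : ¬ ((1 : Int) + m > 1) := by omega
    simp [hm, h1]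

theorem nsiScan_sorted : ∀ (n : Nat) (st : List String), st.length ≤ n →
    st.Pairwise (· ≤ ·) → ∀ (t : Int), nsiScan st t 0 none = t + nsiSum st := by
  intro n
  induction n with
  | zero =>
    intro st hlen _ t
    rw [List.length_eq_zero_iff.mp (Nat.le_zero.mp hlen)]
    simp [nsiScan, nsiSum]
  | succ n ih =>
    intro st hlen hsort t
    cases st with
    | nil => simp [nsiScan, nsiSum]
    | cons k rest =>
      obtain ⟨m, rest', hrest, hk, hsort'⟩ := nsi_sorted_split rest k hsort
      subst hrest
      show nsiScan (k :: (List.replicate m k ++ rest')) t 0 none = _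
      rw [show nsiScan (k :: (List.replicate m k ++ rest')) t 0 none
          = nsiScan (List.replicate m k ++ rest') t 1 (some k) by simp [nsiScan]]
      rw [nsiScan_replicate]
      rw [nsi_sum_split m k rest' hk]
      cases rest' with
      | nil =>
        simp only [nsiScan, nsiSum, PySem.Set.ofList_nil, List.map_nil, List.sum_nil, add_zero]
        split_ifs <;> ring
      | cons k' r' =>
        have hk'k : k' ≠ k := fun h => hk (h ▸ List.mem_cons_self)
        rw [show nsiScan (k' :: r') t (1 + m) (some k)
            = nsiScan r' (if (1:Int) + m > 1 then t + (1 + m) else t) 1 (some k') by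
          simp [nsiScan, hk'k]]
        have hlen' : (k' :: r').length ≤ n := by
          simp only [List.length_cons, List.length_append, List.length_replicate] at hlen ⊢
          omega
        have := ih (k' :: r') hlen' hsort' (if (1:Int) + m > 1 then t + (1 + m) else t)
        rw [show nsiScan (k' :: r') (if (1:Int) + m > 1 then t + (1 + m) else t) 0 none
            = nsiScan r' (if (1:Int) + m > 1 then t + (1 + m) else t) 1 (some k') by
          simp [nsiScan]] at this
        rw [this]
        split_ifs <;> ring

-- sorting does not change nsiSum: the distinct keys are a permutation, the counts are equal
theorem nsi_sum_sorted (l : List String) :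
    nsiSum (PySem.List.sorted l (fun x => x) false) = nsiSum l := by
  unfold nsiSum
  have hperm : (PySem.List.sorted l (fun x => x) false).Perm l := PySem.List.sorted_perm l _ _
  have hcount : ∀ x, (PySem.List.sorted l (fun x => x) false).count x = l.count x :=
    fun x => hperm.count_eq x
  simp only [hcount]
  apply List.Perm.sum_eq
  apply List.Perm.map
  apply (List.perm_ext_iff_of_nodup (PySem.Set.nodup_ofList _) (PySem.Set.nodup_ofList _)).mpr
  intro x
  rw [PySem.Set.mem_ofList, PySem.Set.mem_ofList, PySem.List.mem_sorted]

theorem nsi_B_eq (population : List (List Int)) :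
    number_same_individuals_alt population
    = nsiSum (population.map (fun individual => PySem.Int.toStr (PySem.List.pyGetD individual 0 0))) := by
  unfold number_same_individuals_alt
  set l := population.map (fun individual => PySem.Int.toStr (PySem.List.pyGetD individual 0 0)) with hl
  have hsort : (PySem.List.sorted l (fun x => x) false).Pairwise (· ≤ ·) :=
    PySem.List.sorted_pairwise l (fun x => x)
  have := nsiScan_sorted (PySem.List.sorted l (fun x => x) false).length _ le_rfl hsort 0
  rw [this, zero_add, nsi_sum_sorted]

-- ===== VERDICT (by name: the statement is the Claim_ definition above) =====
theorem number_same_individuals_spec : Claim_equal_number_same_individuals := by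
  intro population _ _
  unfold Spec_number_same_individuals
  rw [nsi_A_eq, nsi_B_eq]
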